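-- pv_equiv track=rewrite | github.com/Spookz0r/AdventOfCode2020 | Dan/03/main.py | get_traverse_path
-- ===== SOURCE A (Python) =====
-- def get_traverse_path(hor, ver, ver_max):
--     x, y = (0,0)
--     coordinates = [(x, y)]
--     while y < ver_max - 1:
--         for i in range(hor):
--             x = x + 1
--         for j in range(ver):
--             y = y + 1
--         coordinates.append((x, y))
--     return coordinates
-- ===== SOURCE B (Python) =====
-- def get_traverse_path(hor, ver, ver_max):
--     steps = -((1 - ver_max) // ver) if ver_max > 1 else 0
--     return [(i * hor, i * ver) for i in range(steps + 1)]
-- ===== Notes on version B (the rewrite author's own statement) =====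
-- stated objective: faster
-- what changed: Replaces the while-loop with nested unit-increment for-loops by a closed-form step count (ceiling division) and a single comprehension producing each coordinate as (i*hor, i*ver).
-- intended difference: For hor < 0 (with ver >= 1 and ver_max > 1) A's 'for i in range(hor)' is empty so every coordinate keeps x = 0, while B returns the intended sloped coordinates (i*hor, i*ver); a negative horizontal step should still move left. — e.g. on get_traverse_path(-3, 1, 3): A returns [(0, 0), (0, 1), (0, 2)], B returns [(0, 0), (-3, 1), (-6, 2)]
import Mathlib
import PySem

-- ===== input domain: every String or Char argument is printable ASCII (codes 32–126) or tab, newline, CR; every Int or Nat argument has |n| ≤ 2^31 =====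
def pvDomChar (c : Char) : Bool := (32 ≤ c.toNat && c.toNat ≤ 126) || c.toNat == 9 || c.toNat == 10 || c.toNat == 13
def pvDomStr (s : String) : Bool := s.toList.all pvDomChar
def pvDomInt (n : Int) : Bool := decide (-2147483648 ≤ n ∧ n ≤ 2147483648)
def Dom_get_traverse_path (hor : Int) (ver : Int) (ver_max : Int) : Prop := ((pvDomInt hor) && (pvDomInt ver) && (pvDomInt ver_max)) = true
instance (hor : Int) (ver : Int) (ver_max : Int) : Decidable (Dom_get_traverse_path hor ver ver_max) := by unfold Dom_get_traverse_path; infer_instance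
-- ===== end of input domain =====

-- B replaces A's while-loop with nested unit-increment for-loops by a closed-form
-- ceiling-division step count and one pass emitting (i*hor, i*ver) directly.

-- ===== PORT A =====
-- while y < ver_max - 1: x += 1 (hor times); y += 1 (ver times); append (x, y).
-- The fuel only makes the recursion total; it is never exhausted on Pre_ inputs.
def pvLoopA (hor ver ver_max : Int) : Nat → Int → Int → List (Int × Int) → List (Int × Int)
  | 0, _, _, acc => acc
  | Nat.succ fuel, x, y, acc =>
    if y < ver_max - 1 then
      let x' := (PySem.List.pyRange 0 hor 1).foldl (fun a _ => a + 1) x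
      let y' := (PySem.List.pyRange 0 ver 1).foldl (fun a _ => a + 1) y
      pvLoopA hor ver ver_max fuel x' y' (acc ++ [(x', y')])
    else acc

def get_traverse_path (hor : Int) (ver : Int) (ver_max : Int) : List (Int × Int) :=
  pvLoopA hor ver ver_max ver_max.toNat 0 0 [((0 : Int), (0 : Int))]

-- ===== PORT B =====
def get_traverse_path_alt (hor : Int) (ver : Int) (ver_max : Int) : List (Int × Int) :=
  let steps : Int := if 1 < ver_max then -(PySem.Int.floordiv (1 - ver_max) ver) else 0
  (PySem.List.pyRange 0 (steps + 1) 1).map (fun i => (i * hor, i * ver))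

-- ===== PRECONDITION & SPEC =====
-- Pre_ excludes exactly the inputs where A's while-loop never terminates
-- (ver ≤ 0 while ver_max - 1 > 0 leaves y stuck below the bound).
def Pre_get_traverse_path (hor : Int) (ver : Int) (ver_max : Int) : Prop :=
  1 ≤ ver ∨ ver_max ≤ 1
instance (hor : Int) (ver : Int) (ver_max : Int) : Decidable (Pre_get_traverse_path hor ver ver_max) := by unfold Pre_get_traverse_path; infer_instance
def pvWitness_get_traverse_path : Int × Int × Int := (3, 1, 11)

-- For hor < 0 (with ver ≥ 1 and ver_max > 1) A's `for i in range(hor)` is empty so every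
-- coordinate keeps x = 0, while B returns the intended sloped coordinates (i*hor, i*ver).
def D_get_traverse_path (hor : Int) (ver : Int) (ver_max : Int) : Prop :=
  hor < 0 ∧ 1 ≤ ver ∧ 1 < ver_max
instance (hor : Int) (ver : Int) (ver_max : Int) : Decidable (D_get_traverse_path hor ver ver_max) := by unfold D_get_traverse_path; infer_instance

def Spec_get_traverse_path (hor : Int) (ver : Int) (ver_max : Int) (out : List (Int × Int)) : Prop :=
  ¬ D_get_traverse_path hor ver ver_max → out = get_traverse_path_alt hor ver ver_max
instance (hor : Int) (ver : Int) (ver_max : Int) (out : List (Int × Int)) : Decidable (Spec_get_traverse_path hor ver ver_max out) := by unfold Spec_get_traverse_path; infer_instance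

def pvDiffWitness_get_traverse_path : Int × Int × Int := (-3, 1, 3)
def pvDiffWitnessOut_get_traverse_path : (List (Int × Int)) × (List (Int × Int)) :=
  ([(0, 0), (0, 1), (0, 2)], [(0, 0), (-3, 1), (-6, 2)])

-- ===== CLAIM (what is proved, stated in full; the proofs are below) =====
def Claim_unchanged_get_traverse_path : Prop := ∀ (hor : Int) (ver : Int) (ver_max : Int), Dom_get_traverse_path hor ver ver_max → Pre_get_traverse_path hor ver ver_max → Spec_get_traverse_path hor ver ver_max (get_traverse_path hor ver ver_max)
def Claim_changed_get_traverse_path : Prop := Dom_get_traverse_path (pvDiffWitness_get_traverse_path.1) (pvDiffWitness_get_traverse_path.2.1) (pvDiffWitness_get_traverse_path.2.2) ∧ Pre_get_traverse_path (pvDiffWitness_get_traverse_path.1) (pvDiffWitness_get_traverse_path.2.1) (pvDiffWitness_get_traverse_path.2.2) ∧ D_get_traverse_path (pvDiffWitness_get_traverse_path.1) (pvDiffWitness_get_traverse_path.2.1) (pvDiffWitness_get_traverse_path.2.2) ∧ get_traverse_path (pvDiffWitness_get_traverse_path.1) (pvDiffWitness_get_traverse_path.2.1) (pvDiffWitness_get_traverse_path.2.2)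 = pvDiffWitnessOut_get_traverse_path.1 ∧ get_traverse_path_alt (pvDiffWitness_get_traverse_path.1) (pvDiffWitness_get_traverse_path.2.1) (pvDiffWitness_get_traverse_path.2.2) = pvDiffWitnessOut_get_traverse_path.2 ∧ pvDiffWitnessOut_get_traverse_path.1 ≠ pvDiffWitnessOut_get_traverse_path.2
def Claim_exact_get_traverse_path : Prop := ∀ (hor : Int) (ver : Int) (ver_max : Int), Dom_get_traverse_path hor ver ver_max → Pre_get_traverse_path hor ver ver_max → D_get_traverse_path hor ver ver_max → get_traverse_path hor ver ver_max ≠ get_traverse_path_alt hor ver ver_max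

-- ===== LEMMAS AND PROOFS =====

-- each pass of "for i in range(m): a = a + 1" adds the length of the range
lemma pv_foldl_succ (l : List Int) (x : Int) : l.foldl (fun a _ => a + 1) x = x + l.length := by
  induction l generalizing x with
  | nil => simp
  | cons h t ih => simp [List.foldl, ih]; omega

lemma pv_step_add (m x : Int) :
    (PySem.List.pyRange 0 m 1).foldl (fun a _ => a + 1) x = x + (m.toNat : Int) := by
  rw [pv_foldl_succ, PySem.List.length_pyRange_one]; norm_num

-- the loop, started at step k with x = k*H, y = k*ver, appends steps k+1 .. n
lemma pv_loopA_eq (hor ver ver_max : Int) (hv : 1 ≤ ver) (n : Int)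
    (hn1 : (n - 1) * ver < ver_max - 1) (hn2 : ver_max - 1 ≤ n * ver) :
    ∀ (fuel : Nat) (k : Int) (acc : List (Int × Int)), 0 ≤ k → k ≤ n → n - k ≤ (fuel : Int) →
      pvLoopA hor ver ver_max fuel (k * (hor.toNat : Int)) (k * ver) acc
        = acc ++ (PySem.List.pyRange (k + 1) (n + 1) 1).map (fun i => (i * (hor.toNat : Int), i * ver)) := by
  intro fuel
  induction fuel with
  | zero =>
    intro k acc hk0 hkn hfuel
    have : k = n := by simp at hfuel; omega
    subst this
    rw [PySem.List.pyRange_one_eq_nil (by omega)]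
    simp [pvLoopA]
  | succ fuel ih =>
    intro k acc hk0 hkn hfuel
    by_cases hlt : k < n
    · have hcond : k * ver < ver_max - 1 := by
        calc k * ver ≤ (n - 1) * ver := by
              apply mul_le_mul_of_nonneg_right (by omega) (by omega)
          _ < ver_max - 1 := hn1
      rw [pvLoopA, if_pos hcond]
      simp only [pv_step_add]
      have hx : k * (hor.toNat : Int) + (hor.toNat : Int) = (k + 1) * (hor.toNat : Int) := by ring
      have hy : k * ver + (ver.toNat : Int) = (k + 1) * ver := by
        have : (ver.toNat : Int) = ver := by omega
        rw [this]; ring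
      have hfuel' : n - (k + 1) ≤ (fuel : Int) := by
        have : ((fuel + 1 : Nat) : Int) = (fuel : Int) + 1 := by push_cast; ring
        omega
      rw [hx, hy, ih (k + 1) _ (by omega) (by omega) hfuel']
      rw [show PySem.List.pyRange (k + 1) (n + 1) 1
            = (k + 1) :: PySem.List.pyRange (k + 1 + 1) (n + 1) 1
          from PySem.List.pyRange_one_cons (by omega)]
      simp
    · have hk : k = n := by omega
      subst hk
      have hcond : ¬ (k * ver < ver_max - 1) := by omega
      rw [pvLoopA, if_neg hcond, PySem.List.pyRange_one_eq_nil (by omega)]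
      simp

-- the whole of A, for ver ≥ 1 and ver_max > 1, with n the ceiling-division step count
lemma pv_A_closed (hor ver ver_max : Int) (hv : 1 ≤ ver) (hm : 1 < ver_max) :
    get_traverse_path hor ver ver_max
      = (PySem.List.pyRange 0 (-(PySem.Int.floordiv (1 - ver_max) ver) + 1) 1).map
          (fun i => (i * (hor.toNat : Int), i * ver)) := by
  set n : Int := -(PySem.Int.floordiv (1 - ver_max) ver) with hn
  have h0 : (1 - ver_max) = -(ver_max - 1) := by ring
  have hbr : (n - 1) * ver < ver_max - 1 ∧ ver_max - 1 ≤ n * ver :=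
    (PySem.Int.neg_floordiv_neg_eq_iff_of_pos (a := ver_max - 1) (b := ver) (q := n)
      (by omega)).mp (by rw [hn, h0])
  have hn1 : 1 ≤ n := by nlinarith [hbr.2]
  have hnb : n ≤ ver_max - 1 := by nlinarith [hbr.1]
  have hfuel : n - 0 ≤ ((ver_max.toNat : Nat) : Int) := by omega
  have hmain := pv_loopA_eq hor ver ver_max hv n hbr.1 hbr.2 ver_max.toNat 0
    [((0 : Int), (0 : Int))] le_rfl (by omega) hfuel
  simp only [zero_mul] at hmain
  unfold get_traverse_path
  rw [hmain, show PySem.List.pyRange 0 (n + 1) 1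
        = 0 :: PySem.List.pyRange (0 + 1) (n + 1) 1
      from PySem.List.pyRange_one_cons (by omega)]
  norm_num

-- when the loop never runs (ver_max ≤ 1) A returns just the start
lemma pv_A_trivial (hor ver ver_max : Int) (hm : ver_max ≤ 1) :
    get_traverse_path hor ver ver_max = [((0 : Int), (0 : Int))] := by
  unfold get_traverse_path
  cases h : ver_max.toNat with
  | zero => simp [pvLoopA]
  | succ m => rw [pvLoopA, if_neg (by omega)]

-- ===== VERDICT (by name: the statement is the Claim_ definition above) =====
theorem get_traverse_path_spec : Claim_unchanged_get_traverse_path := by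
  intro hor ver ver_max _ hpre
  unfold Spec_get_traverse_path
  intro hD
  unfold D_get_traverse_path at hD
  by_cases hm : 1 < ver_max
  · have hv : 1 ≤ ver := by cases hpre with | inl h => exact h | inr h => omega
    have hh : (hor.toNat : Int) = hor := by
      by_cases hh0 : 0 ≤ hor
      · omega
      · exact absurd ⟨by omega, hv, hm⟩ hD
    rw [pv_A_closed hor ver ver_max hv hm]
    unfold get_traverse_path_alt
    rw [if_pos hm, hh]
  · rw [pv_A_trivial hor ver ver_max (by omega)]
    unfold get_traverse_path_alt
    rw [if_neg hm]
    simp [PySem.List.pyRange_one]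

theorem get_traverse_path_changed : Claim_changed_get_traverse_path := by
  unfold Claim_changed_get_traverse_path; decide

theorem get_traverse_path_tight : Claim_exact_get_traverse_path := by
  intro hor ver ver_max _ _ hD heq
  obtain ⟨hh, hv, hm⟩ := hD
  rw [pv_A_closed hor ver ver_max hv hm] at heq
  unfold get_traverse_path_alt at heq
  rw [if_pos hm] at heq
  dsimp only [] at heq
  set n : Int := -(PySem.Int.floordiv (1 - ver_max) ver) with hn
  have h0 : (1 - ver_max) = -(ver_max - 1) := by ring
  have hbr : (n - 1) * ver < ver_max - 1 ∧ ver_max - 1 ≤ n * ver :=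
    (PySem.Int.neg_floordiv_neg_eq_iff_of_pos (a := ver_max - 1) (b := ver) (q := n)
      (by omega)).mp (by rw [hn, h0])
  have hn1 : 1 ≤ n := by nlinarith [hbr.2]
  rw [show PySem.List.pyRange 0 (n + 1) 1
        = 0 :: PySem.List.pyRange (0 + 1) (n + 1) 1
      from PySem.List.pyRange_one_cons (by omega)] at heq
  rw [show PySem.List.pyRange (0 + 1) (n + 1) 1
        = 1 :: PySem.List.pyRange (1 + 1) (n + 1) 1
      from PySem.List.pyRange_one_cons (by omega)] at heq
  simp only [List.map_cons, List.cons.injEq, Prod.mk.injEq] at heq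
  omega
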